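-- pv_equiv track=rewrite | github.com/antof27/xCoreBot | strings_operations.py | values_extractor
-- ===== SOURCE A (Python) =====
-- def values_extractor(flags, values):
--     """
--     Extract query values based on flags.
--
--     Args:
--         flags (list): List of flags.
--         values (list): List of corresponding values.
--
--     Returns:
--         tuple: The extracted query values (query_genre, query_country, query_artist, query_title).
--     """
--     flag_mapping = {
--         "genre": None,
--         "country": None,
--         "artist": None,
--         "title": None
--     }
--
--     for flag in flag_mapping:
--         if flag in flags:
--             index = flags.index(flag)
--             flag_mapping[flag] = values[index]
--
--     query_genre = flag_mapping["genre"]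
--     query_country = flag_mapping["country"]
--     query_artist = flag_mapping["artist"]
--     query_title = flag_mapping["title"]
--
--     return query_genre, query_country, query_artist, query_title
-- ===== SOURCE B (Python) =====
-- def values_extractor(flags, values):
--     """Single backward sweep over the flag/value pairs with a four-slot
--     accumulator: earlier pairs overwrite later ones, so the first
--     occurrence wins, with no dict and no .index scans."""
--     genre = country = artist = title = None
--     for f, v in reversed(list(zip(flags, values))):
--         if f == "genre":
--             genre = v
--         elif f == "country":
--             country = v
--         elif f == "artist":
--             artist = v
--         elif f == "title":
--             title = v
--     return genre, country, artist, title
-- ===== Notes on version B (the rewrite author's own statement) =====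
-- stated objective: alternative
-- what changed: Replaces A's dict of four keys filled by four embedded list.index scans with one backward fold over zip(flags, values) into a four-slot accumulator where earlier pairs overwrite later ones (first occurrence wins).
import Mathlib
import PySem

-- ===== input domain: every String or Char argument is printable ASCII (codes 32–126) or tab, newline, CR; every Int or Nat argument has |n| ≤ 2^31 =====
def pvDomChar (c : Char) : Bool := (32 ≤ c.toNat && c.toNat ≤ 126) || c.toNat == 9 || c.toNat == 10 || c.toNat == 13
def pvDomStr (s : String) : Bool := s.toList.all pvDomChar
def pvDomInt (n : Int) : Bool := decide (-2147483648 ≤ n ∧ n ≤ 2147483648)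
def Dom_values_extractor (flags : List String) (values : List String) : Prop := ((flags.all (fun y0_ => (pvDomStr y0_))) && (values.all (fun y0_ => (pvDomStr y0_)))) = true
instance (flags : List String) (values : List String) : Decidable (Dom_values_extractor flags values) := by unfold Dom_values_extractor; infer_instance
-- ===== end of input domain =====

-- B replaces A's dict-of-four-keys filled by four embedded list.index scans with one
-- backward fold over zip(flags, values) into a four-slot accumulator (objective: alternative).

-- ===== PORT A =====
-- the keys of A's literal flag_mapping dict, in insertion order
def pvKeysA : List String := ["genre", "country", "artist", "title"]

-- 'for flag in flag_mapping: if flag in flags: flag_mapping[flag] = values[flags.index(flag)]'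
def pvStepA (flags : List String) (values : List String)
    (d : PySem.Dict String (Option String)) (flag : String) : PySem.Dict String (Option String) :=
  if flag ∈ flags then
    match PySem.List.index? flags flag with
    | some idx =>
      match PySem.List.pyGet? values (idx : Int) with
      | some v => d.insert flag (some v)
      | none => d  -- values[index] raises IndexError in Python; excluded by Pre_
    | none => d
  else d

def values_extractor (flags : List String) (values : List String) : Option String × Option String × Option String × Option String :=
  let d0 : PySem.Dict String (Option String) :=
    PySem.Dict.ofList [("genre", none), ("country", none), ("artist", none), ("title", none)]
  let d := pvKeysA.foldl (pvStepA flags values) d0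
  (d.getD "genre" none, d.getD "country" none, d.getD "artist" none, d.getD "title" none)

-- ===== PORT B =====
-- the loop body: the if/elif chain updating the four slots for one pair (f, v)
def pvStepB (acc : Option String × Option String × Option String × Option String)
    (p : String × String) : Option String × Option String × Option String × Option String :=
  if p.1 = "genre" then (some p.2, acc.2.1, acc.2.2.1, acc.2.2.2)
  else if p.1 = "country" then (acc.1, some p.2, acc.2.2.1, acc.2.2.2)
  else if p.1 = "artist" then (acc.1, acc.2.1, some p.2, acc.2.2.2)
  else if p.1 = "title" then (acc.1, acc.2.1, acc.2.2.1, some p.2)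
  else acc

-- 'for f, v in reversed(list(zip(flags, values))): …'
def values_extractor_alt (flags : List String) (values : List String) : Option String × Option String × Option String × Option String :=
  ((flags.zip values).reverse).foldl pvStepB (none, none, none, none)

-- ===== PRECONDITION & SPEC =====
-- Pre_ excludes exactly the inputs on which A raises IndexError (a queried flag whose first
-- position in flags is not a valid index into values).
def Pre_values_extractor (flags : List String) (values : List String) : Prop :=
  ∀ k ∈ ["genre", "country", "artist", "title"], k ∈ flags → flags.idxOf k < values.length
instance (flags : List String) (values : List String) : Decidable (Pre_values_extractor flags values) := by unfold Pre_values_extractor; infer_instance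

def pvWitness_values_extractor : List String × List String := (["genre", "x", "title"], ["rock", "y", "t1"])

def Spec_values_extractor (flags : List String) (values : List String) (out : Option String × Option String × Option String × Option String) : Prop := out = values_extractor_alt flags values
instance (flags : List String) (values : List String) (out : Option String × Option String × Option String × Option String) : Decidable (Spec_values_extractor flags values out) := by unfold Spec_values_extractor; infer_instance

-- ===== CLAIM (what is proved, stated in full; the proofs are below) =====
def Claim_equal_values_extractor : Prop := ∀ (flags : List String) (values : List String), Dom_values_extractor flags values → Pre_values_extractor flags values → Spec_values_extractor flags values (values_extractor flags values)
-- ===== LEMMAS AND PROOFS =====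

-- ---- A-side characterisation ----

theorem index?_of_mem (flags : List String) (k : String) (h : k ∈ flags) :
    PySem.List.index? flags k = some (flags.idxOf k) := by
  have hs : (List.idxOf? k flags).isSome := by rw [List.isSome_idxOf?]; exact h
  obtain ⟨n, hn⟩ := Option.isSome_iff_exists.mp hs
  rw [PySem.List.index?_eq_idxOf?, hn, List.idxOf_eq_getD_idxOf?, hn]; rfl

theorem stepA_getD_of_ne (flags values : List String) (d : PySem.Dict String (Option String))
    (k k' : String) (hne : k' ≠ k) :
    (pvStepA flags values d k).getD k' none = d.getD k' none := by
  unfold pvStepA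
  split
  · split
    · split
      · rw [PySem.Dict.getD_insert_of_ne _ _ _ hne]
      · rfl
    · rfl
  · rfl

theorem stepA_getD_self (flags values : List String) (d : PySem.Dict String (Option String))
    (k : String) (hmem : k ∈ flags) (hlt : flags.idxOf k < values.length) :
    (pvStepA flags values d k).getD k none
      = PySem.List.pyGet? values ((flags.idxOf k : Nat) : Int) := by
  unfold pvStepA
  rw [index?_of_mem flags k hmem]
  have hg : PySem.List.pyGet? values ((flags.idxOf k : Nat) : Int)
      = some values[flags.idxOf k] := by
    rw [PySem.List.pyGet?_natCast]
    exact List.getElem?_eq_getElem hlt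
  simp only [hmem, if_true, hg]
  rw [PySem.Dict.getD_insert_self]

theorem foldA_getD_not_mem (flags values : List String) (ks : List String)
    (d : PySem.Dict String (Option String)) (k : String) (h : k ∉ ks) :
    (ks.foldl (pvStepA flags values) d).getD k none = d.getD k none := by
  induction ks generalizing d with
  | nil => rfl
  | cons x xs ih =>
    simp only [List.foldl_cons]
    rw [ih _ (fun hm => h (List.mem_cons_of_mem _ hm)),
        stepA_getD_of_ne _ _ _ _ _ (by rintro rfl; exact h List.mem_cons_self)]

theorem foldA_getD (flags values : List String) (ks : List String)
    (d : PySem.Dict String (Option String)) (k : String) (hk : k ∈ ks) (hnd : ks.Nodup)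
    (hlt : k ∈ flags → flags.idxOf k < values.length) :
    (ks.foldl (pvStepA flags values) d).getD k none
      = if k ∈ flags then PySem.List.pyGet? values ((flags.idxOf k : Nat) : Int)
        else d.getD k none := by
  induction ks generalizing d with
  | nil => cases hk
  | cons x xs ih =>
    simp only [List.foldl_cons]
    rcases List.mem_cons.mp hk with he | hm
    · subst he
      have hnot : k ∉ xs := (List.nodup_cons.mp hnd).1
      rw [foldA_getD_not_mem flags values xs _ k hnot]
      by_cases hmem : k ∈ flags
      · rw [stepA_getD_self flags values d k hmem (hlt hmem)]
        simp [hmem]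
      · simp only [hmem, if_false]
        unfold pvStepA
        simp [hmem]
    · have hne : k ≠ x := by
        rintro rfl
        exact (List.nodup_cons.mp hnd).1 hm
      rw [ih _ hm (List.nodup_cons.mp hnd).2, stepA_getD_of_ne _ _ _ _ _ hne]

-- ---- B-side characterisation ----

-- first-match lookup in a pair list, with a default
def pvPick (l : List (String × String)) (k : String) (d : Option String) : Option String :=
  match l.find? (fun p => p.1 = k) with
  | some p => some p.2
  | none => d

theorem foldB_eq_pick (l : List (String × String))
    (init : Option String × Option String × Option String × Option String) :
    l.reverse.foldl pvStepB init
      = (pvPick l "genre" init.1, pvPick l "country" init.2.1,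
         pvPick l "artist" init.2.2.1, pvPick l "title" init.2.2.2) := by
  rw [List.foldl_reverse]
  induction l with
  | nil => simp [pvPick]
  | cons p l ih =>
    simp only [List.foldr_cons, ih]
    unfold pvStepB pvPick
    by_cases h1 : p.1 = "genre"
    · simp [h1]
    · by_cases h2 : p.1 = "country"
      · simp [h2]
      · by_cases h3 : p.1 = "artist"
        · simp [h3]
        · by_cases h4 : p.1 = "title"
          · simp [h4]
          · simp [h1, h2, h3, h4]

theorem zip_find?_of_mem (flags values : List String) (k : String)
    (hmem : k ∈ flags) (hlt : flags.idxOf k < values.length) :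
    (flags.zip values).find? (fun p => p.1 = k)
      = some (k, values[flags.idxOf k]) := by
  induction flags generalizing values with
  | nil => cases hmem
  | cons f fs ih =>
    cases values with
    | nil => simp at hlt
    | cons v vs =>
      by_cases he : f = k
      · subst he
        simp [List.zip_cons_cons, List.idxOf_cons_self]
      · have hm' : k ∈ fs := by
          rcases List.mem_cons.mp hmem with h | h
          · exact absurd h.symm he
          · exact h
        have hidx : (f :: fs).idxOf k = fs.idxOf k + 1 :=
          List.idxOf_cons_ne _ (fun h => he h)
        have hlt' : fs.idxOf k < vs.length := by
          rw [hidx] at hlt; simpa using hlt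
        have hfind := ih vs hm' hlt'
        rw [List.zip_cons_cons, List.find?_cons_of_neg (by simp [he]), hfind]
        simp [hidx]

theorem zip_find?_of_not_mem (flags values : List String) (k : String) (hnm : k ∉ flags) :
    (flags.zip values).find? (fun p => p.1 = k) = none := by
  rw [List.find?_eq_none]
  intro p hp
  have := (List.of_mem_zip hp).1
  simp only [decide_eq_true_eq]
  intro hpk
  exact hnm (hpk ▸ this)

theorem pick_zip (flags values : List String) (k : String)
    (hlt : k ∈ flags → flags.idxOf k < values.length) :
    pvPick (flags.zip values) k none
      = if k ∈ flags then PySem.List.pyGet? values ((flags.idxOf k : Nat) : Int) else none := by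
  unfold pvPick
  by_cases hmem : k ∈ flags
  · rw [zip_find?_of_mem flags values k hmem (hlt hmem)]
    rw [if_pos hmem, PySem.List.pyGet?_natCast, List.getElem?_eq_getElem (hlt hmem)]
  · rw [zip_find?_of_not_mem flags values k hmem, if_neg hmem]

-- ---- main equivalence ----

theorem values_extractor_eq_alt (flags values : List String)
    (hpre : Pre_values_extractor flags values) :
    values_extractor flags values = values_extractor_alt flags values := by
  have hkey : ∀ k ∈ pvKeysA,
      (pvKeysA.foldl (pvStepA flags values)
          (PySem.Dict.ofList [("genre", none), ("country", none), ("artist", none), ("title", none)])).getD k none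
        = pvPick (flags.zip values) k none := by
    intro k hk
    rw [foldA_getD flags values pvKeysA _ k hk (by decide)
        (fun hm => hpre k (by revert hk; exact id) hm),
      pick_zip flags values k (fun hm => hpre k (by revert hk; exact id) hm)]
    by_cases hmem : k ∈ flags
    · simp [hmem]
    · simp only [hmem, if_false]
      fin_cases hk <;> rfl
  simp only [values_extractor, values_extractor_alt]
  rw [foldB_eq_pick]
  rw [hkey "genre" (by decide), hkey "country" (by decide), hkey "artist" (by decide),
      hkey "title" (by decide)]

-- ===== VERDICT (by name: the statement is the Claim_ definition above) =====
theorem values_extractor_spec : Claim_equal_values_extractor := by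
  intro flags values _ hpre
  exact values_extractor_eq_alt flags values hpre
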